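-- pv_equiv track=rewrite | github.com/slynnykusbk-glitch/contract_ai | contract_review_app/gpt/gpt_draft.py | _neutralize_unknown_sources
-- ===== SOURCE A (Python) =====
-- from typing import Any, Dict, List, Optional, Tuple, Union
--
-- def _neutralize_unknown_sources(text: str, allowed: List[str]) -> Tuple[str, List[str]]:
--     """
--     Remove simple source-like patterns that are not in the allowed list.
--     Heuristic: strip bracketed chunks mentioning Act/Regulation/Directive/Article/Section unless they match allowed.
--     """
--     removed: List[str] = []
--     out = []
--     i = 0
--     s = text
--     while i < len(s):
--         ch = s[i]
--         if ch in "([":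
--             close = ")" if ch == "(" else "]"
--             j = s.find(close, i + 1)
--             if j != -1:
--                 chunk = s[i : j + 1]
--                 chunk_low = chunk.lower()
--                 if any(tok in chunk_low for tok in ("act", "regulation", "directive", "code", "article", "section")):
--                     if not any(src.lower() in chunk_low for src in (allowed or [])):
--                         removed.append(chunk)
--                         i = j + 1
--                         continue
--         out.append(ch)
--         i += 1
--     return "".join(out), removed
-- ===== SOURCE B (Python) =====
-- from typing import List, Tuple
--
-- _TOKENS = ("act", "regulation", "directive", "code", "article", "section")
--
--
-- def _next_close(text: str, c: str) -> List[int]: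
--     # one backward pass: nxt[i] = smallest index >= i with text[index] == c, else -1
--     nxt = [-1] * (len(text) + 1)
--     for i in range(len(text) - 1, -1, -1):
--         nxt[i] = i if text[i] == c else nxt[i + 1]
--     return nxt
--
--
-- def _neutralize_unknown_sources(text: str, allowed: List[str]) -> Tuple[str, List[str]]:
--     low = text.lower()
--     allowed_low = [src.lower() for src in (allowed or [])]
--     next_paren = _next_close(text, ")")
--     next_brack = _next_close(text, "]")
--     out = []
--     removed: List[str] = []
--     i = 0
--     n = len(text)
--     while i < n:
--         ch = text[i]
--         if ch in "([":
--             j = (next_paren if ch == "(" else next_brack)[i + 1]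
--             if j != -1:
--                 chunk_low = low[i : j + 1]
--                 if any(t in chunk_low for t in _TOKENS) and not any(a in chunk_low for a in allowed_low):
--                     removed.append(text[i : j + 1])
--                     i = j + 1
--                     continue
--         out.append(ch)
--         i += 1
--     return "".join(out), removed
-- ===== Notes on version B (the rewrite author's own statement) =====
-- stated objective: alternative
-- what changed: B precomputes, in one backward pass each, arrays of the next ')' and ']' position and a lowercased copy of the text plus a lowercased allowed list, so the forward scan locates the closing bracket in O(1) per position instead of re-scanning with str.find and re-lowercasing each chunk and each allowed entry.
import Mathlib
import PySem

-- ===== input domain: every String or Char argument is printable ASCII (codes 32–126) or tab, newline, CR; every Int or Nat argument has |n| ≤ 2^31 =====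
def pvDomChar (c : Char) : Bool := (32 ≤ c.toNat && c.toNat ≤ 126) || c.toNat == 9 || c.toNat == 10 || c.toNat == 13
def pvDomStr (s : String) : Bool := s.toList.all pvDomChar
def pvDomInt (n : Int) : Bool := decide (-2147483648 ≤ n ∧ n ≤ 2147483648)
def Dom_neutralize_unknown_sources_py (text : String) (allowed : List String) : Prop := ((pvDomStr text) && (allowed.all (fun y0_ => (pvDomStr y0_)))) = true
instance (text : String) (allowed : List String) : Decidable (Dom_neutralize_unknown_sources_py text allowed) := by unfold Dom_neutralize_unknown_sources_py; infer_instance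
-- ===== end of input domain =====

-- B precomputes next-close-bracket arrays (one backward pass each) and a lowercased text and
-- allowed list once, replacing A's per-position str.find scan and per-chunk lowercasing;
-- alternative algorithm of similar measured speed.

-- the token tuple ("act", "regulation", "directive", "code", "article", "section"), shared data
def pvToks : List (List Char) :=
  ["act".toList, "regulation".toList, "directive".toList, "code".toList, "article".toList, "section".toList]

-- ===== PORT A =====
-- A's while loop; fuel = |text| (i strictly increases each iteration, so this never runs dry;
-- fuel only makes the recursion structural).  Each 'else' is Python's fall-through to out.append(ch); i += 1.
def pvALoop (cs : List Char) (allowed : List String) : Nat → Nat → List Char → List String → String × List String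
  | 0, _, out, removed => (String.ofList out, removed)
  | fuel+1, i, out, removed =>
    if h : i < cs.length then
      let ch := cs[i]
      if ch = '(' ∨ ch = '[' then      -- ch in "(["
        let close := if ch = '(' then ')' else ']'
        let j := PySem.Chars.findFrom cs [close] ((i : Int) + 1) none   -- s.find(close, i+1)
        if j ≠ -1 then
          let chunk := PySem.List.slice cs (some (i : Int)) (some (j + 1))   -- s[i:j+1]
          let chunkLow := PySem.Chars.lower chunk
          if pvToks.any (fun t => PySem.Chars.isIn t chunkLow) then
            -- '(allowed or [])' iterates exactly over allowed
            if !(allowed.any (fun src => PySem.Chars.isIn (PySem.Chars.lower src.toList) chunkLow)) then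
              pvALoop cs allowed fuel (j + 1).toNat out (removed ++ [String.ofList chunk])
            else pvALoop cs allowed fuel (i + 1) (out ++ [ch]) removed
          else pvALoop cs allowed fuel (i + 1) (out ++ [ch]) removed
        else pvALoop cs allowed fuel (i + 1) (out ++ [ch]) removed
      else pvALoop cs allowed fuel (i + 1) (out ++ [ch]) removed
    else (String.ofList out, removed)

def neutralize_unknown_sources_py (text : String) (allowed : List String) : String × List String :=
  pvALoop text.toList allowed text.toList.length 0 [] []

-- ===== PORT B =====
-- _next_close(text, c): the backward fill 'nxt[i] = i if text[i]==c else nxt[i+1]' ported as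
-- structural recursion over the suffix starting at absolute index i (result has length |cs|+1, last entry -1)
def pvNextGo (c : Char) : List Char → Nat → List Int
  | [], _ => [-1]
  | x :: xs, i =>
    let r := pvNextGo c xs (i + 1)
    (if x = c then (i : Int) else r.headD (-1)) :: r

-- B's forward loop over precomputed low, allowed_low, next_paren, next_brack
def pvBLoop (cs low : List Char) (allowedLow : List (List Char)) (nxtP nxtB : List Int) :
    Nat → Nat → List Char → List String → String × List String
  | 0, _, out, removed => (String.ofList out, removed)
  | fuel+1, i, out, removed =>
    if h : i < cs.length then
      let ch := cs[i]
      if ch = '(' ∨ ch = '[' then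
        -- nxt[i+1]: always in range (the list has length |cs|+1), so pyGetD's default is never used
        let j := PySem.List.pyGetD (if ch = '(' then nxtP else nxtB) ((i : Int) + 1) (-1)
        if j ≠ -1 then
          let chunkLow := PySem.List.slice low (some (i : Int)) (some (j + 1))   -- low[i:j+1]
          if pvToks.any (fun t => PySem.Chars.isIn t chunkLow)
              && !(allowedLow.any (fun a => PySem.Chars.isIn a chunkLow)) then
            pvBLoop cs low allowedLow nxtP nxtB fuel (j + 1).toNat out
              (removed ++ [String.ofList (PySem.List.slice cs (some (i : Int)) (some (j + 1)))])
          else pvBLoop cs low allowedLow nxtP nxtB fuel (i + 1) (out ++ [ch]) removed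
        else pvBLoop cs low allowedLow nxtP nxtB fuel (i + 1) (out ++ [ch]) removed
      else pvBLoop cs low allowedLow nxtP nxtB fuel (i + 1) (out ++ [ch]) removed
    else (String.ofList out, removed)

def neutralize_unknown_sources_py_alt (text : String) (allowed : List String) : String × List String :=
  let cs := text.toList
  pvBLoop cs (PySem.Chars.lower cs) (allowed.map (fun src => PySem.Chars.lower src.toList))
    (pvNextGo ')' cs 0) (pvNextGo ']' cs 0) cs.length 0 [] []

-- ===== PRECONDITION & SPEC =====
def Spec_neutralize_unknown_sources_py (text : String) (allowed : List String) (out : String × List String) : Prop := out = neutralize_unknown_sources_py_alt text allowed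
instance (text : String) (allowed : List String) (out : String × List String) : Decidable (Spec_neutralize_unknown_sources_py text allowed out) := by unfold Spec_neutralize_unknown_sources_py; infer_instance

-- ===== CLAIM (what is proved, stated in full; the proofs are below) =====
def Claim_equal_neutralize_unknown_sources_py : Prop := ∀ (text : String) (allowed : List String), Dom_neutralize_unknown_sources_py text allowed → Spec_neutralize_unknown_sources_py text allowed (neutralize_unknown_sources_py text allowed)

-- ===== LEMMAS AND PROOFS =====

theorem pv_singleton_prefix_iff (l : List Char) (c : Char) : [c] <+: l ↔ l.head? = some c := by
  constructor
  · rintro ⟨t, rfl⟩; rfl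
  · intro h; cases l with
    | nil => simp at h
    | cons x xs => simp at h; subst h; exact ⟨xs, rfl⟩

-- Chars.find for a single-character needle is List.findIdx?
theorem pv_find_singleton (l : List Char) (c : Char) :
    PySem.Chars.find l [c] =
      (match l.findIdx? (fun x => x == c) with | some d => (d : Int) | none => -1) := by
  cases h : l.findIdx? (fun x => x == c) with
  | none =>
    have hall := List.findIdx?_eq_none_iff.mp h
    have : ¬ [c] <:+: l := by
      intro hin
      have hc : c ∈ l := hin.subset (by simp)
      have := hall c hc
      simp at this
    simpa using (PySem.Chars.find_eq_neg_one_iff l [c]).mpr this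
  | some d =>
    obtain ⟨hd, hpd, hmin⟩ := List.findIdx?_eq_some_iff_getElem.mp h
    have hcd : l[d]? = some c := by
      have : l[d] = c := by simpa using hpd
      simp [List.getElem?_eq_getElem hd, this]
    have hinf : [c] <:+: l := by
      have hc : c ∈ l := by
        have : d < l.length := hd
        exact List.mem_of_getElem? hcd
      obtain ⟨s, t, rfl⟩ := List.append_of_mem hc
      exact ⟨s, t, by simp⟩
    have hnn : 0 ≤ PySem.Chars.find l [c] := (PySem.Chars.find_nonneg_iff l [c]).mpr hinf
    obtain ⟨hpre, hfirst⟩ := PySem.Chars.find_spec hnn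
    have h1 : l[(PySem.Chars.find l [c]).toNat]? = some c := by
      have := (pv_singleton_prefix_iff _ c).mp hpre
      rwa [List.head?_drop] at this
    -- (find).toNat = d by mutual minimality
    have hge : d ≤ (PySem.Chars.find l [c]).toNat := by
      by_contra hlt
      have hlt' : (PySem.Chars.find l [c]).toNat < d := by omega
      have := hmin _ hlt'
      have hlen : (PySem.Chars.find l [c]).toNat < l.length := by
        have := List.getElem?_eq_some_iff.mp h1
        exact this.1
      have hval : l[(PySem.Chars.find l [c]).toNat] = c := by
        have := List.getElem?_eq_getElem hlen ▸ h1
        exact Option.some.inj this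
      simp [hval] at this
    have hle : (PySem.Chars.find l [c]).toNat ≤ d := by
      by_contra hlt
      have hlt' : d < (PySem.Chars.find l [c]).toNat := by omega
      exact hfirst _ hlt' ((pv_singleton_prefix_iff _ c).mpr (by rw [List.head?_drop]; exact hcd))
    have heq : (PySem.Chars.find l [c]).toNat = d := le_antisymm hle hge
    show PySem.Chars.find l [c] = (d : Int)
    omega

-- correctness of the backward-filled table
theorem pv_nextGo_getElem? (c : Char) (l : List Char) (i k : Nat) (hk : k ≤ l.length) :
    (pvNextGo c l i)[k]? =
      some (match (l.drop k).findIdx? (fun x => x == c) with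
            | some d => ((i + k + d : Nat) : Int) | none => -1) := by
  induction l generalizing i k with
  | nil =>
    have : k = 0 := by simpa using hk
    subst this
    simp [pvNextGo]
  | cons x xs ih =>
    cases k with
    | zero =>
      have h0 := ih (i + 1) 0 (Nat.zero_le _)
      simp only [pvNextGo, List.getElem?_cons_zero, List.drop_zero] at *
      rw [List.findIdx?_cons]
      by_cases hx : x = c
      · simp [hx]
      · have hx' : (x == c) = false := by simp [hx]
        simp only [hx', if_neg hx, Bool.false_eq_true, if_false]
        have : (pvNextGo c xs (i + 1)).headD (-1) =
            (match xs.findIdx? (fun x => x == c) with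
             | some d => ((i + 1 + 0 + d : Nat) : Int) | none => -1) := by
          rw [List.headD_eq_head?_getD, List.head?_eq_getElem?, h0]
          rfl
        rw [this]
        cases hf : xs.findIdx? (fun x => x == c) with
        | none => simp
        | some d => simp; ring
    | succ k =>
      have hk' : k ≤ xs.length := by simpa using hk
      have := ih (i + 1) k hk'
      simp only [pvNextGo, List.getElem?_cons_succ, List.drop_succ_cons]
      rw [this]
      cases hf : (xs.drop k).findIdx? (fun x => x == c) with
      | none => rfl
      | some d => simp; ring

-- A's s.find(close, i+1) equals B's table lookup nxt[i+1]
theorem pv_jEq (cs : List Char) (c : Char) (i : Nat) (h : i < cs.length) :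
    PySem.Chars.findFrom cs [c] ((i : Int) + 1) none =
      PySem.List.pyGetD (pvNextGo c cs 0) ((i : Int) + 1) (-1) := by
  have hk : i + 1 ≤ cs.length := h
  have hcast : ((i : Int) + 1) = ((i + 1 : Nat) : Int) := by push_cast; ring
  rw [hcast]
  rw [PySem.Chars.findFrom_natCast cs [c] (i + 1) hk]
  rw [pv_find_singleton]
  unfold PySem.List.pyGetD
  rw [PySem.List.pyGet?_natCast, pv_nextGo_getElem? c cs 0 (i + 1) hk]
  cases hf : (cs.drop (i + 1)).findIdx? (fun x => x == c) with
  | none => simp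
  | some d =>
    simp only [Option.getD_some]
    have h1 : ¬ ((d : Int) = -1) := by omega
    simp only [h1, if_false]
    push_cast
    ring

-- lowering commutes with slicing (lower is a map; slice only reads the length)
theorem pv_lower_slice (cs : List Char) (a b : Option Int) :
    PySem.Chars.lower (PySem.List.slice cs a b) = PySem.List.slice (PySem.Chars.lower cs) a b := by
  simp only [PySem.Chars.lower, PySem.List.slice, List.length_map, List.map_take, List.map_drop]

-- the two loops agree step by step
theorem pv_loop_eq (cs : List Char) (allowed : List String) (fuel i : Nat) (out : List Char)
    (removed : List String) :
    pvALoop cs allowed fuel i out removed =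
      pvBLoop cs (PySem.Chars.lower cs) (allowed.map (fun src => PySem.Chars.lower src.toList))
        (pvNextGo ')' cs 0) (pvNextGo ']' cs 0) fuel i out removed := by
  induction fuel generalizing i out removed with
  | zero => rfl
  | succ f ih =>
    simp only [pvALoop, pvBLoop]
    by_cases h : i < cs.length
    · simp only [dif_pos h]
      by_cases hb : cs[i] = '(' ∨ cs[i] = '['
      · simp only [if_pos hb]
        have htab : (if cs[i] = '(' then pvNextGo ')' cs 0 else pvNextGo ']' cs 0) =
            pvNextGo (if cs[i] = '(' then ')' else ']') cs 0 := by
          by_cases hp : cs[i] = '(' <;> simp [hp]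
        rw [htab, ← pv_jEq cs (if cs[i] = '(' then ')' else ']') i h]
        set j := PySem.Chars.findFrom cs [if cs[i] = '(' then ')' else ']'] ((i : Int) + 1) none with hj
        by_cases hj1 : j ≠ -1
        · simp only [if_pos hj1]
          rw [← pv_lower_slice cs (some (i : Int)) (some (j + 1))]
          set chunkLow := PySem.Chars.lower (PySem.List.slice cs (some (i : Int)) (some (j + 1)))
          have hmap : (allowed.map (fun src => PySem.Chars.lower src.toList)).any
              (fun a => PySem.Chars.isIn a chunkLow) =
              allowed.any (fun src => PySem.Chars.isIn (PySem.Chars.lower src.toList) chunkLow) := by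
            rw [List.any_map]; rfl
          rw [hmap]
          by_cases ht : pvToks.any (fun t => PySem.Chars.isIn t chunkLow)
          · by_cases ha : allowed.any (fun src => PySem.Chars.isIn (PySem.Chars.lower src.toList) chunkLow)
            · simp only [ht, ha, Bool.not_true, Bool.and_false, if_pos, Bool.false_eq_true,
                if_false]
              exact ih _ _ _
            · have ha' : allowed.any (fun src => PySem.Chars.isIn (PySem.Chars.lower src.toList) chunkLow) = false := by
                simpa using ha
              simp only [ht, ha', Bool.not_false, Bool.and_true, if_pos]
              exact ih _ _ _
          · have ht' : pvToks.any (fun t => PySem.Chars.isIn t chunkLow) = false := by simpa using ht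
            simp only [ht', Bool.false_and, Bool.false_eq_true, if_false]
            exact ih _ _ _
        · simp only [if_neg hj1]
          exact ih _ _ _
      · simp only [if_neg hb]
        exact ih _ _ _
    · simp only [dif_neg h]

-- ===== VERDICT (by name: the statement is the Claim_ definition above) =====
theorem neutralize_unknown_sources_py_spec : Claim_equal_neutralize_unknown_sources_py := by
  intro text allowed _
  unfold Spec_neutralize_unknown_sources_py neutralize_unknown_sources_py neutralize_unknown_sources_py_alt
  exact pv_loop_eq text.toList allowed text.toList.length 0 [] []
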